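-- pv_equiv track=rewrite | github.com/gui-gregorio/CaesarCipher | Caesar Cipher.py | resetaContador
-- ===== SOURCE A (Python) =====
-- def resetaContador(x):
--     count = 0
--
--
--     if x > 26:
--         for i in range(26,x):
--             count +=1
--             if count > 26:
--                 count = 0
--     return(count)
-- ===== SOURCE B (Python) =====
-- def resetaContador(x):
--     # Closed form: the loop runs x-26 times cycling count through 0..26.
--     if x > 26:
--         return (x - 26) % 27
--     return 0
-- ===== Notes on version B (the rewrite author's own statement) =====
-- stated objective: faster
-- what changed: Replaced the O(x) counting loop (increment with reset past 26) by the closed form (x-26) % 27.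
import Mathlib
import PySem

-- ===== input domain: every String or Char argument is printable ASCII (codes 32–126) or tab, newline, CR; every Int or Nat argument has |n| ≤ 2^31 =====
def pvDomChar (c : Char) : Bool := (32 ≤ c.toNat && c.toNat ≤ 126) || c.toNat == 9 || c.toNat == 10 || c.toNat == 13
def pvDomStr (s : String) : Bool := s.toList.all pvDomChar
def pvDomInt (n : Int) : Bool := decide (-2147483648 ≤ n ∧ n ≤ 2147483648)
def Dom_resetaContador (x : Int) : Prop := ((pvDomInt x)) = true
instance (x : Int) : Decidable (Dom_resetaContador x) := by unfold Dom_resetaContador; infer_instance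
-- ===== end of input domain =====

-- B replaces A's O(x) increment-and-reset loop by the closed form (x-26) % 27 (faster, asymptotic).

-- ===== PORT A =====
def resetaContador (x : Int) : Int :=
  let count : Int := 0
  if x > 26 then
    (PySem.List.pyRange 26 x 1).foldl
      (fun count _ =>
        let count := count + 1
        if count > 26 then 0 else count) count
  else count

-- ===== PORT B =====
def resetaContador_alt (x : Int) : Int :=
  if x > 26 then PySem.Int.mod (x - 26) 27 else 0

-- ===== PRECONDITION & SPEC =====
def Spec_resetaContador (x : Int) (out : Int) : Prop := out = resetaContador_alt x
instance (x : Int) (out : Int) : Decidable (Spec_resetaContador x out) := by unfold Spec_resetaContador; infer_instance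

-- ===== CLAIM (what is proved, stated in full; the proofs are below) =====
def Claim_equal_resetaContador : Prop := ∀ (x : Int), Dom_resetaContador x → Spec_resetaContador x (resetaContador x)

-- ===== LEMMAS AND PROOFS =====

-- the loop, started at count c with 0 ≤ c < 27, ends at (c + length) % 27
theorem pv_loop_mod (l : List Int) (c : Int) (hc : 0 ≤ c) (hc' : c < 27) :
    l.foldl (fun count _ => let count := count + 1; if count > 26 then 0 else count) c
      = (c + l.length) % 27 := by
  induction l generalizing c with
  | nil => simp; omega
  | cons a t ih =>
    simp only [List.foldl_cons, List.length_cons]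
    by_cases h : c + 1 > 26
    · rw [if_pos h, ih 0 le_rfl (by norm_num)]
      have hc27 : c = 26 := by omega
      subst hc27
      omega
    · rw [if_neg h, ih (c+1) (by omega) (by omega)]
      omega

-- ===== VERDICT (by name: the statement is the Claim_ definition above) =====
theorem resetaContador_spec : Claim_equal_resetaContador := by
  intro x _
  unfold Spec_resetaContador resetaContador resetaContador_alt
  by_cases h : x > 26
  · simp only [if_pos h]
    rw [pv_loop_mod _ 0 le_rfl (by norm_num)]
    simp [PySem.List.length_pyRange_one, PySem.Int.mod, Int.fmod_eq_emod]
    omega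
  · simp [h]
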